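-- pv_equiv track=rewrite | github.com/ShirGold/FinalProjectNumericAnalysis | assignment2.py | filter_close_roots
-- ===== SOURCE A (Python) =====
-- def filter_close_roots(roots, err):
--     i = 0
--     end = len(roots)-1
--     while i < end:
--         if abs(roots[i] - roots[i+1]) < err:
--             roots.pop(i)
--             i -= 1
--             end -= 1
--         i += 1
--     return roots
-- ===== SOURCE B (Python) =====
-- def filter_close_roots(roots, err):
--     # Single pass over adjacent pairs: keep roots[i] iff its successor is at
--     # least err away; the last element is always kept. Returns a NEW list
--     # (A mutates and returns its argument; equivalence is about return value).
--     return [a for a, b in zip(roots, roots[1:]) if abs(a - b) >= err] + roots[-1:]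
-- ===== Notes on version B (the rewrite author's own statement) =====
-- stated objective: faster
-- what changed: A repeatedly pops close roots from the list in place with index bookkeeping (each pop shifts the tail, O(n^2) worst case); B makes one pass over adjacent pairs, keeping each element whose successor is at least err away plus the last element. A mutates and returns its argument; B returns a new list (return values are equal).
import Mathlib
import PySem

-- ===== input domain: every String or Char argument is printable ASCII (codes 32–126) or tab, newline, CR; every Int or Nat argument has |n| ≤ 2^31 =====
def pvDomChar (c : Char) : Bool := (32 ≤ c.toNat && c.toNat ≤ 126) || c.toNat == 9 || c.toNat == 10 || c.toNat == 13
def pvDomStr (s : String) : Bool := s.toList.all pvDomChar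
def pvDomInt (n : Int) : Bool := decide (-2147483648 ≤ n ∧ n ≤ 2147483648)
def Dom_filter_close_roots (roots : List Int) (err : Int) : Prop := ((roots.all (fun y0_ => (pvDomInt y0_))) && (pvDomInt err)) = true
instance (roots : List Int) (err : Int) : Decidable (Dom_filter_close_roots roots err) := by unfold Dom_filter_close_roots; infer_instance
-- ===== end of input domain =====

-- B replaces A's quadratic pop-in-place loop by one linear pass over adjacent pairs;
-- A mutates its argument in place and returns it, B builds a new list: the equivalence
-- proved here is about the RETURN value only.

-- ===== PORT A =====
-- A's while loop: state (roots, i, end); pop(i) is PySem.List.pop?; the `none` match arms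
-- are unreachable guards making the recursion total (i and i+1 are always in range).
def filterCloseLoopA (err : Int) (l : List Int) (i e : Int) : List Int :=
  if _h : i < e then
    match PySem.List.pyGet? l i, PySem.List.pyGet? l (i + 1) with
    | some a, some b =>
      if |a - b| < err then
        match PySem.List.pop? l i with
        | some (_, l') => filterCloseLoopA err l' (i - 1 + 1) (e - 1)
        | none => l
      else filterCloseLoopA err l (i + 1) e
    | _, _ => l
  else l
termination_by (e - i).toNat
decreasing_by all_goals omega

def filter_close_roots (roots : List Int) (err : Int) : List Int :=
  filterCloseLoopA err roots 0 ((roots.length : Int) - 1)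

-- ===== PORT B =====
-- Source B: [a for a, b in zip(roots, roots[1:]) if abs(a - b) >= err] + roots[-1:]
def filter_close_roots_alt (roots : List Int) (err : Int) : List Int :=
  ((roots.zip (PySem.List.slice roots (some 1) none)).filter
      (fun p => decide (err ≤ |p.1 - p.2|))).map Prod.fst
    ++ PySem.List.slice roots (some (-1)) none

-- ===== PRECONDITION & SPEC =====
def Spec_filter_close_roots (roots : List Int) (err : Int) (out : List Int) : Prop := out = filter_close_roots_alt roots err
instance (roots : List Int) (err : Int) (out : List Int) : Decidable (Spec_filter_close_roots roots err out) := by unfold Spec_filter_close_roots; infer_instance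

-- ===== CLAIM (what is proved, stated in full; the proofs are below) =====
def Claim_equal_filter_close_roots : Prop := ∀ (roots : List Int) (err : Int), Dom_filter_close_roots roots err → Spec_filter_close_roots roots err (filter_close_roots roots err)

-- ===== LEMMAS AND PROOFS =====

-- Recursive characterisation of the filtered list: keep an element iff its successor is far.
def altRec (err : Int) : List Int → List Int
  | [] => []
  | [a] => [a]
  | a :: b :: t => if |a - b| < err then altRec err (b :: t) else a :: altRec err (b :: t)

lemma altRec_short (err : Int) (l : List Int) (h : l.length ≤ 1) : altRec err l = l := by
  match l with
  | [] => rfl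
  | [a] => rfl
  | a :: b :: t => simp at h

lemma alt_eq_altRec (roots : List Int) (err : Int) :
    filter_close_roots_alt roots err = altRec err roots := by
  induction roots with
  | nil => rfl
  | cons a l ih =>
    match l with
    | [] => rfl
    | b :: t =>
      unfold filter_close_roots_alt at ih ⊢
      simp only [PySem.List.slice_some_none, PySem.List.clampIdx] at ih ⊢
      norm_num [List.zip, List.zipWith, List.filter_cons] at ih ⊢
      rw [if_neg (show ¬((t.length : Int) < 0) by omega)] at ih
      rw [if_neg (show ¬((t.length : Int) + 1 < 0) by omega)]
      simp only [List.drop_succ_cons, altRec]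
      rcases le_or_gt err |a - b| with h | h
      · rw [if_pos h, if_neg (show ¬(|a - b| < err) by omega)]
        simp only [List.map_cons, List.cons_append, List.cons.injEq, true_and]
        exact ih
      · rw [if_neg (show ¬(err ≤ |a - b|) by omega), if_pos h]
        exact ih

-- Loop invariant: with e = len l - 1 and 0 ≤ i, what remains to be decided is the
-- suffix from i; the prefix before i is already final.
lemma loopA_eq (err : Int) (n : Nat) :
    ∀ (l : List Int) (i e : Int), 0 ≤ i → e = (l.length : Int) - 1 → (e - i).toNat = n →
      filterCloseLoopA err l i e = l.take i.toNat ++ altRec err (l.drop i.toNat) := by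
  induction n using Nat.strong_induction_on with
  | _ n ih =>
    intro l i e hi he hn
    obtain ⟨m, rfl⟩ : ∃ m : Nat, i = (m : Int) := ⟨i.toNat, by omega⟩
    by_cases hie : (m : Int) < e
    · have hi1 : m + 1 < l.length := by omega
      have hi0 : m < l.length := by omega
      rw [filterCloseLoopA, dif_pos hie]
      rw [show ((m : Int) + 1) = ((m + 1 : Nat) : Int) by push_cast; ring]
      rw [PySem.List.pyGet?_natCast, PySem.List.pyGet?_natCast]
      rw [List.getElem?_eq_getElem hi0, List.getElem?_eq_getElem hi1]
      simp only
      have hdrop : l.drop m = l[m] :: l.drop (m + 1) := List.drop_eq_getElem_cons hi0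
      have hdrop1 : l.drop (m + 1) = l[m + 1] :: l.drop (m + 2) := List.drop_eq_getElem_cons hi1
      by_cases hc : |l[m] - l[m + 1]| < err
      · rw [if_pos hc, PySem.List.pop?_natCast l m hi0]
        simp only
        have hlen' : (l.eraseIdx m).length = l.length - 1 := List.length_eraseIdx_of_lt hi0
        rw [show ((m : Int) - 1 + 1) = (m : Int) by ring]
        rw [ih (e - 1 - m).toNat (by omega) (l.eraseIdx m) m (e - 1) (by omega)
          (by rw [hlen']; omega) rfl]
        rw [Int.toNat_natCast, List.eraseIdx_eq_take_drop_succ]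
        have htake : (l.take m ++ l.drop (m + 1)).take m = l.take m := by
          rw [List.take_append_of_le_length (by simp; omega)]
          simp
        have hdrop' : (l.take m ++ l.drop (m + 1)).drop m = l.drop (m + 1) := by
          rw [List.drop_append_of_le_length (by simp; omega)]
          simp
        rw [htake, hdrop', hdrop, hdrop1, altRec, if_pos hc, ← hdrop1]
      · rw [if_neg hc]
        rw [show ((m + 1 : Nat) : Int) = (m : Int) + 1 by push_cast; ring]
        rw [ih (e - ((m : Int) + 1)).toNat (by omega) l ((m : Int) + 1) e (by omega) he rfl]
        rw [show ((m : Int) + 1).toNat = m + 1 by omega, Int.toNat_natCast]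
        rw [hdrop, hdrop1, altRec, if_neg hc, ← hdrop1]
        rw [List.take_succ_eq_append_getElem hi0, List.append_assoc, List.singleton_append]
    · rw [filterCloseLoopA, dif_neg hie]
      rw [altRec_short err _ (by simp; omega)]
      exact (List.take_append_drop _ _).symm

-- ===== VERDICT (by name: the statement is the Claim_ definition above) =====
theorem filter_close_roots_spec : Claim_equal_filter_close_roots := by
  intro roots err _
  unfold Spec_filter_close_roots filter_close_roots
  rw [loopA_eq err ((((roots.length : Int) - 1) - 0).toNat) roots 0 ((roots.length : Int) - 1)
    le_rfl rfl rfl]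
  simp [alt_eq_altRec]
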